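-- pv_equiv track=rewrite | github.com/MrBrantCode/unitest_baseline | mut_generate/mist_train_taco/taco_1833/solution.py | min_moves_to_digit_sum
-- ===== SOURCE A (Python) =====
-- def min_moves_to_digit_sum(n: int, s: int) -> int:
--     def digit_sum(num: int) -> int:
--         res = 0
--         while num > 0:
--             res += num % 10
--             num //= 10
--         return res
--
--     def digit_length(num: int) -> int:
--         res = 0
--         while num > 0:
--             res += 1
--             num //= 10
--         return res
--
--     if digit_sum(n) <= s:
--         return 0
--
--     len_n = digit_length(n)
--     ans = 10**20  # A large number to ensure any valid move will be smaller
--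
--     for i in range(len_n):
--         p = n // (10 ** (i + 1))
--         p = p * (10 ** (i + 1))
--         p += 10 ** (i + 1)
--         if digit_sum(p) <= s:
--             ans = min(ans, p - n)
--
--     return ans
-- ===== SOURCE B (Python) =====
-- def min_moves_to_digit_sum(n: int, s: int) -> int:
--     def digit_sum(num: int) -> int:
--         res = 0
--         while num > 0:
--             res += num % 10
--             num //= 10
--         return res
--
--     if digit_sum(n) <= s:
--         return 0
--
--     # Greedy: round the running value up to the next multiple of 10, 100, ...
--     # (one step per digit of n) and return on the first value whose digit sum fits.
--     v = n
--     p = 10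
--     t = n
--     while t > 0:
--         v += p - v % p
--         if digit_sum(v) <= s:
--             return v - n
--         p *= 10
--         t //= 10
--     return 10**20
-- ===== Notes on version B (the rewrite author's own statement) =====
-- stated objective: alternative
-- what changed: Instead of generating every round-up candidate and taking the minimum of all valid ones, B keeps a single running value that it rounds up to the next multiple of a growing power of ten and returns at the first value whose digit sum fits (early exit, no digit_length pass, no candidate minimum).
import Mathlib
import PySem

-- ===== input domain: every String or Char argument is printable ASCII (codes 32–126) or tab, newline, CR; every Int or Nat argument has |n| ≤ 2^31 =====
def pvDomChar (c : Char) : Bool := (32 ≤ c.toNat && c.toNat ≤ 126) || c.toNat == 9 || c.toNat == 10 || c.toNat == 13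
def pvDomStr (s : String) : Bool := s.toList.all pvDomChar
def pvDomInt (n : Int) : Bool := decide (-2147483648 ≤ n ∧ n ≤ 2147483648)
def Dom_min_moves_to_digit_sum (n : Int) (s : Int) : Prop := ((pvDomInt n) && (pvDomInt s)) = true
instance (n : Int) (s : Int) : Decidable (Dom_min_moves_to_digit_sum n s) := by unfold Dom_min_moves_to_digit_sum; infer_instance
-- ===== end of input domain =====

-- B replaces A's candidate sweep + minimum by a single greedy running value with early exit (alternative decomposition, same cost).

-- ===== PORT A =====
-- shared inner helper `digit_sum` (textually identical in Source A and Source B): while num > 0: res += num % 10; num //= 10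
def pyDigitSum (num : Int) : Int :=
  if h : 0 < num then PySem.Int.mod num 10 + pyDigitSum (PySem.Int.floordiv num 10) else 0
termination_by num.toNat
decreasing_by
  rw [PySem.Int.floordiv_eq_ediv_of_pos (by norm_num)]
  omega

def pyDigitLength (num : Int) : Int :=
  if h : 0 < num then 1 + pyDigitLength (PySem.Int.floordiv num 10) else 0
termination_by num.toNat
decreasing_by
  rw [PySem.Int.floordiv_eq_ediv_of_pos (by norm_num)]
  omega

def min_moves_to_digit_sum (n : Int) (s : Int) : Int :=
  if pyDigitSum n ≤ s then 0
  else
    let len_n := pyDigitLength n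
    -- for i in range(len_n): …  (i ≥ 0 inside the range, so 10 ** (i+1) is (10:Int) ^ (i+1).toNat)
    (PySem.List.pyRange 0 len_n 1).foldl (fun ans i =>
      let p := PySem.Int.floordiv n ((10:Int) ^ (i + 1).toNat)
      let p := p * ((10:Int) ^ (i + 1).toNat)
      let p := p + (10:Int) ^ (i + 1).toNat
      if pyDigitSum p ≤ s then min ans (p - n) else ans) ((10:Int) ^ 20)

-- ===== PORT B =====
-- the while loop of Source B, state (v, p, t)
def altLoop (n : Int) (s : Int) (v : Int) (p : Int) (t : Int) : Int :=
  if h : 0 < t then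
    let v' := v + (p - PySem.Int.mod v p)
    if pyDigitSum v' ≤ s then v' - n
    else altLoop n s v' (p * 10) (PySem.Int.floordiv t 10)
  else (10:Int) ^ 20
termination_by t.toNat
decreasing_by
  rw [PySem.Int.floordiv_eq_ediv_of_pos (by norm_num)]
  omega

def min_moves_to_digit_sum_alt (n : Int) (s : Int) : Int :=
  if pyDigitSum n ≤ s then 0 else altLoop n s n 10 n

-- ===== PRECONDITION & SPEC =====
def Spec_min_moves_to_digit_sum (n : Int) (s : Int) (out : Int) : Prop := out = min_moves_to_digit_sum_alt n s
instance (n : Int) (s : Int) (out : Int) : Decidable (Spec_min_moves_to_digit_sum n s out) := by unfold Spec_min_moves_to_digit_sum; infer_instance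

-- ===== CLAIM (what is proved, stated in full; the proofs are below) =====
def Claim_equal_min_moves_to_digit_sum : Prop := ∀ (n : Int) (s : Int), Dom_min_moves_to_digit_sum n s → Spec_min_moves_to_digit_sum n s (min_moves_to_digit_sum n s)

-- ===== LEMMAS AND PROOFS =====

-- unfoldings in ediv/emod form
lemma pyDigitSum_pos (num : Int) (h : 0 < num) :
    pyDigitSum num = num % 10 + pyDigitSum (num / 10) := by
  rw [pyDigitSum]
  simp [h, PySem.Int.mod_eq_emod_of_pos (show (0:Int) < 10 by norm_num),
        PySem.Int.floordiv_eq_ediv_of_pos (show (0:Int) < 10 by norm_num)]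

lemma pyDigitSum_nonpos (num : Int) (h : ¬ 0 < num) : pyDigitSum num = 0 := by
  rw [pyDigitSum]; simp [h]

lemma pyDigitLength_pos (num : Int) (h : 0 < num) :
    pyDigitLength num = 1 + pyDigitLength (num / 10) := by
  rw [pyDigitLength]
  simp [h, PySem.Int.floordiv_eq_ediv_of_pos (show (0:Int) < 10 by norm_num)]

lemma pyDigitLength_nonpos (num : Int) (h : ¬ 0 < num) : pyDigitLength num = 0 := by
  rw [pyDigitLength]; simp [h]

lemma pyDigitLength_nonneg (num : Int) : 0 ≤ pyDigitLength num := by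
  by_cases h : 0 < num
  · rw [pyDigitLength_pos num h]
    have ih := pyDigitLength_nonneg (num / 10)
    omega
  · rw [pyDigitLength_nonpos num h]
termination_by num.toNat
decreasing_by omega

-- digit-length bounds: n < 10^D ≤ 10*n for n > 0, D the digit length
lemma dl_bounds (n : Int) (h : 0 < n) :
    n < 10 ^ (pyDigitLength n).toNat ∧ (10:Int) ^ (pyDigitLength n).toNat ≤ 10 * n := by
  rw [pyDigitLength_pos n h]
  by_cases hm : 0 < n / 10
  · have ih := dl_bounds (n / 10) hm
    have hL := pyDigitLength_nonneg (n / 10)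
    have h1 : (1 + pyDigitLength (n / 10)).toNat = (pyDigitLength (n / 10)).toNat + 1 := by omega
    rw [h1, pow_succ]
    obtain ⟨ih1, ih2⟩ := ih
    set a := (10:Int) ^ (pyDigitLength (n / 10)).toNat with ha
    constructor
    · nlinarith [Int.emod_add_ediv n 10, Int.emod_nonneg n (by norm_num : (10:Int) ≠ 0),
                 Int.emod_lt_of_pos n (by norm_num : (0:Int) < 10)]
    · nlinarith [Int.emod_add_ediv n 10, Int.emod_nonneg n (by norm_num : (10:Int) ≠ 0)]
  · have h10 : n < 10 := by omega
    have hz : pyDigitLength (n / 10) = 0 := pyDigitLength_nonpos _ hm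
    rw [hz]
    norm_num
    omega
termination_by n.toNat
decreasing_by omega

-- digit-sum lemmas
lemma ds_mul_ten (b : Int) (hb : 0 ≤ b) : pyDigitSum (b * 10) = pyDigitSum b := by
  rcases lt_or_eq_of_le hb with hb' | hb'
  · have hpos : 0 < b * 10 := by positivity
    rw [pyDigitSum_pos _ hpos]
    have h1 : b * 10 % 10 = 0 := by omega
    have h2 : b * 10 / 10 = b := by omega
    rw [h1, h2]; ring
  · rw [← hb']
    norm_num

lemma ds_mul_pow (b : Int) (hb : 0 ≤ b) (j : Nat) :
    pyDigitSum (b * 10 ^ j) = pyDigitSum b := by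
  induction j with
  | zero => norm_num
  | succ j ih =>
      have h : b * 10 ^ (j + 1) = (b * 10 ^ j) * 10 := by ring
      rw [h, ds_mul_ten _ (by positivity), ih]

lemma ds_succ_of_not9 (b : Int) (hb : 0 ≤ b) (h9 : b % 10 ≠ 9) :
    pyDigitSum (b + 1) = pyDigitSum b + 1 := by
  have h1 : (b + 1) % 10 = b % 10 + 1 := by omega
  have h2 : (b + 1) / 10 = b / 10 := by omega
  rw [pyDigitSum_pos (b + 1) (by omega), h1, h2]
  by_cases hb0 : 0 < b
  · rw [pyDigitSum_pos b hb0]; ring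
  · have hb' : b = 0 := by omega
    subst hb'
    norm_num [pyDigitSum_nonpos]

-- generic round-up-step arithmetic
lemma lt_step (x p : Int) (hp : 0 < p) : x < (x / p + 1) * p := by
  have h1 := Int.emod_add_ediv x p
  have h2 := Int.emod_lt_of_pos x hp
  nlinarith

lemma step_le (x p : Int) (hp : 0 < p) : (x / p + 1) * p ≤ x + p := by
  have h1 := Int.emod_add_ediv x p
  have h2 := Int.emod_nonneg x (by omega : p ≠ 0)
  nlinarith

lemma least_step (x p m : Int) (hp : 0 < p) (hd : p ∣ m) (hm : x < m) :
    (x / p + 1) * p ≤ m := by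
  obtain ⟨q, rfl⟩ := hd
  have hq : x / p < q := by
    by_contra hq
    push_neg at hq
    have h1 := Int.emod_add_ediv x p
    have h2 := Int.emod_nonneg x (by omega : p ≠ 0)
    nlinarith
  nlinarith

-- a smaller multiple of d is at least d smaller
lemma dvd_lt_add (d a b : Int) (hd0 : 0 < d) (ha : d ∣ a) (hb : d ∣ b) (h : a < b) :
    a + d ≤ b := by
  have hdvd : d ∣ b - a := dvd_sub hb ha
  have := Int.le_of_dvd (by omega) hdvd
  omega

-- the greedy chain and A's candidates
def gchain (n : Int) : Nat → Int
  | 0 => n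
  | j + 1 => (gchain n j / 10 ^ (j + 1) + 1) * 10 ^ (j + 1)

def gcand (n : Int) (i : Nat) : Int := (n / 10 ^ (i + 1) + 1) * 10 ^ (i + 1)

lemma gchain_dvd (n : Int) (j : Nat) : (10:Int) ^ j ∣ gchain n j := by
  cases j with
  | zero => simp
  | succ j =>
      show (10:Int) ^ (j+1) ∣ (gchain n j / 10 ^ (j + 1) + 1) * 10 ^ (j + 1)
      exact dvd_mul_left _ _

lemma gchain_dvd_succ (n : Int) (j : Nat) : (10:Int) ^ (j+1) ∣ gchain n (j+1) :=
  gchain_dvd n (j+1)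

lemma gchain_lt_succ (n : Int) (j : Nat) : gchain n j < gchain n (j + 1) :=
  lt_step _ _ (by positivity)

lemma gchain_mono (n : Int) {j k : Nat} (h : j ≤ k) : gchain n j ≤ gchain n k := by
  induction k with
  | zero => simp_all
  | succ k ih =>
      rcases Nat.lt_or_ge j (k+1) with h' | h'
      · exact le_trans (ih (by omega)) (gchain_lt_succ n k).le
      · have hjk : j = k + 1 := by omega
        subst hjk; rfl

lemma gchain_strict_mono (n : Int) {j k : Nat} (h : j < k) : gchain n j < gchain n k :=
  lt_of_le_of_lt (gchain_mono n (by omega : j ≤ k - 1))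
    (by have := gchain_lt_succ n (k-1); rwa [show k - 1 + 1 = k by omega] at this)

lemma gchain_gt (n : Int) (j : Nat) (h : 1 ≤ j) : n < gchain n j :=
  gchain_strict_mono n (by omega : 0 < j)

lemma gchain_succ_le (n : Int) (j : Nat) : gchain n (j + 1) ≤ gchain n j + 10 ^ (j + 1) :=
  step_le _ _ (by positivity)

lemma gchain_least (n : Int) (j : Nat) (m : Int) (hd : (10:Int) ^ (j+1) ∣ m)
    (hm : gchain n j < m) : gchain n (j + 1) ≤ m :=
  least_step _ _ _ (by positivity) hd hm

lemma gcand_gt (n : Int) (i : Nat) : n < gcand n i :=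
  lt_step _ _ (by positivity)

lemma gcand_dvd (n : Int) (i : Nat) : (10:Int) ^ (i+1) ∣ gcand n i :=
  dvd_mul_left _ _

lemma gcand_least (n : Int) (i : Nat) (m : Int) (hd : (10:Int) ^ (i+1) ∣ m)
    (hm : n < m) : gcand n i ≤ m :=
  least_step _ _ _ (by positivity) hd hm

lemma gcand_le (n : Int) (i : Nat) : gcand n i ≤ n + 10 ^ (i+1) :=
  step_le _ _ (by positivity)

-- growth bound of the chain
lemma gchain_growth (n : Int) {k m : Nat} (h : k ≤ m) :
    gchain n m < gchain n k + 10 ^ (m + 1) := by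
  induction m with
  | zero =>
      have hk : k = 0 := by omega
      subst hk
      have : (0:Int) < 10 ^ (0 + 1) := by positivity
      omega
  | succ m ih =>
      rcases Nat.lt_or_ge k (m+1) with h' | h'
      · have h1 := gchain_succ_le n m
        have h2 := ih (by omega)
        have h3 : (2:Int) * 10 ^ (m+1) ≤ 10 ^ (m+1+1) := by
          have hps : (10:Int) ^ (m+1+1) = 10 ^ (m+1) * 10 := pow_succ 10 (m+1)
          have hp : (0:Int) < 10 ^ (m+1) := by positivity
          linarith
        omega
      · have hk : k = m + 1 := by omega
        subst hk
        have : (0:Int) < 10 ^ (m+1+1) := by positivity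
        omega

-- every candidate occurs in the chain
lemma cand_in_chain (n : Int) (i : Nat) :
    ∃ k, 1 ≤ k ∧ k ≤ i + 1 ∧ gchain n k = gcand n i := by
  have aux : ∀ m, m ≤ i + 1 →
      gchain n m ≤ gcand n i ∨ ∃ k, 1 ≤ k ∧ k ≤ m ∧ gchain n k = gcand n i := by
    intro m
    induction m with
    | zero => intro _; left; exact (gcand_gt n i).le
    | succ m ih =>
        intro hm
        rcases ih (by omega) with hle | ⟨k, hk⟩
        · rcases lt_or_eq_of_le hle with hlt | heq
          · left
            apply gchain_least n m _ _ hlt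
            exact dvd_trans (pow_dvd_pow 10 (by omega : m + 1 ≤ i + 1)) (gcand_dvd n i)
          · right
            refine ⟨m, ?_, by omega, heq⟩
            rcases Nat.eq_zero_or_pos m with h0 | h0
            · exfalso
              subst h0
              have := gcand_gt n i
              simp [gchain] at heq
              omega
            · omega
        · right; exact ⟨k, hk.1, by omega, hk.2.2⟩
  rcases aux (i+1) le_rfl with hle | ⟨k, hk⟩
  · refine ⟨i + 1, by omega, le_rfl, le_antisymm hle ?_⟩
    exact gcand_least n i _ (gchain_dvd_succ n i) (gchain_gt n (i+1) (by omega))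
  · exact ⟨k, hk⟩

-- first greedy success is a candidate (direction 2)
lemma first_success_is_cand (n s : Int) (hn : 0 < n) (j : Nat)
    (hj1 : 1 ≤ j) (hjD : j ≤ (pyDigitLength n).toNat)
    (hfail : ∀ k, 1 ≤ k → k < j → s < pyDigitSum (gchain n k))
    (hs : pyDigitSum (gchain n j) ≤ s) :
    ∃ i, i < (pyDigitLength n).toNat ∧ gcand n i = gchain n j := by
  obtain ⟨jp, rfl⟩ : ∃ jp, j = jp + 1 := ⟨j - 1, by omega⟩
  by_cases hc : gchain n (jp + 1) = gcand n jp
  · exact ⟨jp, by omega, hc.symm⟩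
  · have hge : gcand n jp ≤ gchain n (jp + 1) :=
      gcand_least n jp _ (gchain_dvd_succ n jp) (gchain_gt n (jp + 1) (by omega))
    have hgt : gcand n jp < gchain n (jp + 1) := lt_of_le_of_ne hge (fun h => hc h.symm)
    have hprev : gcand n jp ≤ gchain n jp := by
      by_contra hcon
      push_neg at hcon
      have := gchain_least n jp _ (gcand_dvd n jp) hcon
      omega
    obtain ⟨k, hk1, hk2, hkeq⟩ := cand_in_chain n jp
    have hklt : k < jp + 1 := by
      rcases Nat.lt_or_ge k (jp + 1) with h | h
      · exact h
      · exfalso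
        have hke : k = jp + 1 := by omega
        rw [hke] at hkeq
        omega
    have hfailk : s < pyDigitSum (gchain n k) := hfail k hk1 hklt
    have hub : gchain n (jp + 1) ≤ gchain n k + 10 ^ (jp + 1) := by
      apply gchain_least n jp
      · exact dvd_add (hkeq ▸ gcand_dvd n jp) dvd_rfl
      · exact gchain_growth n (show k ≤ jp by omega)
    have hlb2 : gchain n k + 10 ^ (jp + 1) ≤ gchain n (jp + 1) := by
      apply dvd_lt_add _ _ _ (by positivity) (hkeq ▸ gcand_dvd n jp) (gchain_dvd_succ n jp)
      omega
    have heq : gchain n (jp + 1) = gchain n k + 10 ^ (jp + 1) := le_antisymm hub hlb2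
    have hPpos : (0:Int) < 10 ^ (jp + 1) := by positivity
    have hbk : gchain n k = (n / 10 ^ (jp + 1) + 1) * 10 ^ (jp + 1) := by rw [hkeq]; rfl
    have hb0 : 0 ≤ n / 10 ^ (jp + 1) + 1 := by
      have : 0 ≤ n / 10 ^ (jp + 1) := Int.ediv_nonneg (le_of_lt hn) (le_of_lt hPpos)
      omega
    have hdsk : pyDigitSum (gchain n k) = pyDigitSum (n / 10 ^ (jp + 1) + 1) := by
      rw [hbk]; exact ds_mul_pow _ hb0 (jp + 1)
    have hdsj : pyDigitSum (gchain n (jp + 1)) = pyDigitSum (n / 10 ^ (jp + 1) + 1 + 1) := by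
      rw [heq, hbk, show (n / 10 ^ (jp + 1) + 1) * 10 ^ (jp + 1) + 10 ^ (jp + 1)
            = (n / 10 ^ (jp + 1) + 1 + 1) * 10 ^ (jp + 1) by ring]
      exact ds_mul_pow _ (by omega) (jp + 1)
    by_cases h9 : (n / 10 ^ (jp + 1) + 1) % 10 = 9
    · -- carry case: the rolled-over value is the next candidate
      have hjD' : jp + 1 < (pyDigitLength n).toNat := by
        rcases Nat.lt_or_ge (jp + 1) (pyDigitLength n).toNat with h | h
        · exact h
        · exfalso
          have hDe : (pyDigitLength n).toNat = jp + 1 := by omega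
          have hnP : n < 10 ^ (jp + 1) := by
            have := (dl_bounds n hn).1
            rwa [hDe] at this
          have hz : n / 10 ^ (jp + 1) = 0 := Int.ediv_eq_zero_of_lt (le_of_lt hn) hnP
          rw [hz] at h9
          norm_num at h9
      refine ⟨jp + 1, hjD', ?_⟩
      obtain ⟨c, hcde⟩ : (10:Int) ∣ n / 10 ^ (jp + 1) + 1 + 1 := by omega
      have hdvd2 : (10:Int) ^ (jp + 1 + 1) ∣ gchain n (jp + 1) := by
        refine ⟨c, ?_⟩
        have hps : (10:Int) ^ (jp + 1 + 1) = 10 ^ (jp + 1) * 10 := pow_succ 10 (jp + 1)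
        rw [heq, hbk, hps]
        linear_combination (10:Int) ^ (jp + 1) * hcde
      have hle1 : gcand n (jp + 1) ≤ gchain n (jp + 1) :=
        gcand_least n (jp + 1) _ hdvd2 (gchain_gt n (jp + 1) (by omega))
      have hge1 : gchain n (jp + 1) ≤ gcand n (jp + 1) := by
        by_contra hcon
        push_neg at hcon
        have hge2 : gcand n jp ≤ gcand n (jp + 1) :=
          gcand_least n jp _ (dvd_trans (pow_dvd_pow 10 (by omega)) (gcand_dvd n (jp + 1)))
            (gcand_gt n (jp + 1))
        obtain ⟨q, hq⟩ : (10:Int) ^ (jp + 1) ∣ gcand n (jp + 1) :=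
          dvd_trans (pow_dvd_pow 10 (by omega)) (gcand_dvd n (jp + 1))
        have hq1 : q < n / 10 ^ (jp + 1) + 1 + 1 := by
          have h' : 10 ^ (jp + 1) * q < (n / 10 ^ (jp + 1) + 1 + 1) * 10 ^ (jp + 1) := by
            rw [← hq]
            calc gcand n (jp + 1) < gchain n (jp + 1) := hcon
              _ = _ := by rw [heq, hbk]; ring
          have := lt_of_mul_lt_mul_left (by linarith [h'] : 10 ^ (jp + 1) * q
              < 10 ^ (jp + 1) * (n / 10 ^ (jp + 1) + 1 + 1)) (le_of_lt hPpos)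
          exact this
        have hq2 : n / 10 ^ (jp + 1) + 1 ≤ q := by
          have h' : (n / 10 ^ (jp + 1) + 1) * 10 ^ (jp + 1) ≤ q * 10 ^ (jp + 1) := by
            rw [← hbk, hkeq]
            calc gcand n jp ≤ gcand n (jp + 1) := hge2
              _ = q * 10 ^ (jp + 1) := by rw [hq]; ring
          exact le_of_mul_le_mul_right h' hPpos
        have hqe : q = n / 10 ^ (jp + 1) + 1 := by omega
        have hd10 : (10:Int) ∣ n / 10 ^ (jp + 1) + 1 := by
          obtain ⟨r, hr⟩ := gcand_dvd n (jp + 1)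
          refine ⟨r, ?_⟩
          have hps : (10:Int) ^ (jp + 1 + 1) = 10 ^ (jp + 1) * 10 := pow_succ 10 (jp + 1)
          have hcanc : (10:Int) ^ (jp + 1) * (n / 10 ^ (jp + 1) + 1)
              = 10 ^ (jp + 1) * (10 * r) := by
            calc (10:Int) ^ (jp + 1) * (n / 10 ^ (jp + 1) + 1) = 10 ^ (jp + 1) * q := by
                  rw [hqe]
              _ = gcand n (jp + 1) := hq.symm
              _ = 10 ^ (jp + 1 + 1) * r := hr
              _ = 10 ^ (jp + 1) * (10 * r) := by rw [hps]; ring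
          exact mul_left_cancel₀ (ne_of_gt hPpos) hcanc
        omega
      exact le_antisymm hle1 hge1
    · -- no-carry case: the digit sum grew by exactly 1, contradicting success
      exfalso
      have := ds_succ_of_not9 _ hb0 h9
      omega

-- A's fold characterization
def afold (n s : Int) : Int :=
  (List.range (pyDigitLength n).toNat).foldl
    (fun ans k => if pyDigitSum (gcand n k) ≤ s then min ans (gcand n k - n) else ans)
    ((10:Int) ^ 20)

lemma aport_eq_afold (n s : Int) (hds : ¬ pyDigitSum n ≤ s) :
    min_moves_to_digit_sum n s = afold n s := by
  have hstep : min_moves_to_digit_sum n s =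
      (PySem.List.pyRange 0 (pyDigitLength n) 1).foldl
        (fun ans i =>
          if pyDigitSum (PySem.Int.floordiv n ((10:Int) ^ (i + 1).toNat) * (10:Int) ^ (i + 1).toNat
              + (10:Int) ^ (i + 1).toNat) ≤ s
          then min ans (PySem.Int.floordiv n ((10:Int) ^ (i + 1).toNat) * (10:Int) ^ (i + 1).toNat
              + (10:Int) ^ (i + 1).toNat - n)
          else ans) ((10:Int) ^ 20) := by
    unfold min_moves_to_digit_sum
    rw [if_neg hds]
  rw [hstep]
  unfold afold
  have hL := pyDigitLength_nonneg n
  rw [PySem.List.pyRange_one, List.foldl_map]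
  have he : (pyDigitLength n - 0).toNat = (pyDigitLength n).toNat := by omega
  rw [he]
  congr 1
  funext ans k
  simp only [zero_add]
  have h1 : (((k:Nat) : Int) + 1).toNat = k + 1 := by omega
  simp only [h1]
  rw [PySem.Int.floordiv_eq_ediv_of_pos (by positivity : (0:Int) < 10 ^ (k + 1))]
  have hp : n / 10 ^ (k + 1) * 10 ^ (k + 1) + 10 ^ (k + 1) = gcand n k := by
    unfold gcand; ring
  rw [hp]

lemma afold_fail_aux (n s : Int) (l : List Nat) (acc : Int)
    (h : ∀ k ∈ l, s < pyDigitSum (gcand n k)) :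
    l.foldl (fun ans k => if pyDigitSum (gcand n k) ≤ s then min ans (gcand n k - n) else ans)
      acc = acc := by
  induction l generalizing acc with
  | nil => rfl
  | cons a l ih =>
      simp only [List.foldl_cons]
      rw [if_neg (not_le.mpr (h a (by simp)))]
      exact ih acc (fun k hk => h k (by simp [hk]))

lemma afold_all_fail (n s : Int)
    (h : ∀ i, i < (pyDigitLength n).toNat → s < pyDigitSum (gcand n i)) :
    afold n s = (10:Int) ^ 20 := by
  unfold afold
  exact afold_fail_aux n s _ _ (fun k hk => h k (List.mem_range.mp hk))

lemma afold_min_aux (n s V : Int) (l : List Nat) (acc : Int)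
    (hlb : ∀ k ∈ l, pyDigitSum (gcand n k) ≤ s → V - n ≤ gcand n k - n)
    (hex : acc = V - n ∨ ∃ k ∈ l, pyDigitSum (gcand n k) ≤ s ∧ gcand n k = V)
    (hacc : V - n ≤ acc) :
    l.foldl (fun ans k => if pyDigitSum (gcand n k) ≤ s then min ans (gcand n k - n) else ans)
      acc = V - n := by
  induction l generalizing acc with
  | nil =>
      rcases hex with h | ⟨k, hk, _⟩
      · exact h
      · exact absurd hk (List.not_mem_nil)
  | cons a l ih =>
      simp only [List.foldl_cons]
      by_cases hsa : pyDigitSum (gcand n a) ≤ s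
      · rw [if_pos hsa]
        have hma : V - n ≤ gcand n a - n := hlb a (by simp) hsa
        have hge : V - n ≤ min acc (gcand n a - n) := le_min hacc hma
        refine ih _ (fun k hk h' => hlb k (by simp [hk]) h') ?_ hge
        rcases hex with h | ⟨k, hk, hks, hkV⟩
        · left; rw [h]; exact min_eq_left hma
        · rcases List.mem_cons.mp hk with rfl | hk'
          · left
            rw [hkV]
            exact min_eq_right hacc
          · right; exact ⟨k, hk', hks, hkV⟩
      · rw [if_neg hsa]
        refine ih acc (fun k hk h' => hlb k (by simp [hk]) h') ?_ hacc
        rcases hex with h | ⟨k, hk, hks, hkV⟩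
        · left; exact h
        · rcases List.mem_cons.mp hk with rfl | hk'
          · exact absurd hks hsa
          · right; exact ⟨k, hk', hks, hkV⟩

lemma afold_min (n s V : Int)
    (hmem : ∃ i, i < (pyDigitLength n).toNat ∧ gcand n i = V ∧ pyDigitSum (gcand n i) ≤ s)
    (hlb : ∀ i, i < (pyDigitLength n).toNat → pyDigitSum (gcand n i) ≤ s → V ≤ gcand n i)
    (hbig : V - n ≤ (10:Int) ^ 20) :
    afold n s = V - n := by
  unfold afold
  obtain ⟨i, hiD, hiV, his⟩ := hmem
  refine afold_min_aux n s V _ _ ?_ ?_ hbig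
  · intro k hk h'
    have := hlb k (List.mem_range.mp hk) h'
    omega
  · right; exact ⟨i, List.mem_range.mpr hiD, his, hiV⟩

-- the B loop from state j computes A's fold (main induction)
lemma altLoop_eq_afold (n s : Int) (hn : 0 < n) (hb : n ≤ 2147483648) (j : Nat)
    (hfail : ∀ k, 1 ≤ k → k ≤ j → s < pyDigitSum (gchain n k)) :
    altLoop n s (gchain n j) (10 ^ (j + 1)) (n / 10 ^ j) = afold n s := by
  have hD := dl_bounds n hn
  by_cases hjD : j < (pyDigitLength n).toNat
  · have hpowle : (10:Int) ^ j ≤ n := by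
      have h1 : (10:Int) ^ (j + 1) ≤ 10 ^ (pyDigitLength n).toNat :=
        pow_le_pow_right₀ (by norm_num) (by omega)
      have h2 : (10:Int) ^ (j + 1) = 10 ^ j * 10 := pow_succ 10 j
      linarith [hD.2]
    have ht : 0 < n / 10 ^ j := by
      have h1 : (1:Int) ≤ n / 10 ^ j := by
        rw [Int.le_ediv_iff_mul_le (by positivity)]
        simpa using hpowle
      omega
    rw [altLoop, dif_pos ht]
    have hv' : gchain n j + (10 ^ (j + 1) - PySem.Int.mod (gchain n j) (10 ^ (j + 1)))
        = gchain n (j + 1) := by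
      rw [PySem.Int.mod_eq_emod_of_pos (by positivity)]
      have h1 := Int.emod_add_mul_ediv (gchain n j) (10 ^ (j + 1))
      show _ = (gchain n j / 10 ^ (j + 1) + 1) * 10 ^ (j + 1)
      linear_combination -h1
    simp only [hv']
    by_cases hsj : pyDigitSum (gchain n (j + 1)) ≤ s
    · rw [if_pos hsj]
      obtain ⟨i, hiD, hieq⟩ := first_success_is_cand n s hn (j + 1) (by omega) (by omega)
        (fun k hk1 hk2 => hfail k hk1 (by omega)) hsj
      symm
      refine afold_min n s (gchain n (j + 1)) ⟨i, hiD, hieq, by rw [hieq]; exact hsj⟩ ?_ ?_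
      · intro i' hi' hsi'
        obtain ⟨k, hk1, hk2, hkeq⟩ := cand_in_chain n i'
        rw [← hkeq] at hsi' ⊢
        have hkj : j + 1 ≤ k := by
          by_contra hkj
          exact absurd hsi' (not_le.mpr (hfail k hk1 (by omega)))
        exact gchain_mono n hkj
      · have h1 : gchain n (j + 1) = gcand n i := hieq.symm
        have h2 : gcand n i ≤ n + 10 ^ (i + 1) := gcand_le n i
        have h3 : (10:Int) ^ (i + 1) ≤ 10 ^ (pyDigitLength n).toNat :=
          pow_le_pow_right₀ (by norm_num) (by omega)
        have h4 : (10:Int) ^ (pyDigitLength n).toNat ≤ 10 * n := hD.2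
        have h5 : (10:Int) * n ≤ 10 * 2147483648 := by linarith
        have h6 : (10:Int) * 2147483648 ≤ 10 ^ 20 := by norm_num
        linarith
    · rw [if_neg hsj]
      have hstep : (10:Int) ^ (j + 1) * 10 = 10 ^ (j + 1 + 1) := (pow_succ 10 (j + 1)).symm
      have hdiv : PySem.Int.floordiv (n / 10 ^ j) 10 = n / 10 ^ (j + 1) := by
        rw [PySem.Int.floordiv_eq_ediv_of_pos (by norm_num)]
        rw [Int.ediv_ediv_eq_ediv_mul (show (0:Int) ≤ 10 ^ j by positivity)]
        rw [← pow_succ]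
      rw [hstep, hdiv]
      exact altLoop_eq_afold n s hn hb (j + 1) (fun k hk1 hk2 => by
        rcases Nat.lt_or_ge k (j + 1) with h | h
        · exact hfail k hk1 (by omega)
        · have hke : k = j + 1 := by omega
          subst hke
          exact not_le.mp hsj)
  · have hnP : n < 10 ^ j :=
      lt_of_lt_of_le hD.1 (pow_le_pow_right₀ (by norm_num) (by omega))
    have ht : ¬ 0 < n / 10 ^ j := by
      rw [Int.ediv_eq_zero_of_lt (le_of_lt hn) hnP]
      norm_num
    rw [altLoop, dif_neg ht]
    symm
    apply afold_all_fail
    intro i hiD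
    obtain ⟨k, hk1, hk2, hkeq⟩ := cand_in_chain n i
    rw [← hkeq]
    exact hfail k hk1 (by omega)
termination_by (pyDigitLength n).toNat - j
decreasing_by omega

-- ===== VERDICT (by name: the statement is the Claim_ definition above) =====
theorem min_moves_to_digit_sum_spec : Claim_equal_min_moves_to_digit_sum := by
  intro n s hdom
  unfold Spec_min_moves_to_digit_sum
  by_cases h : pyDigitSum n ≤ s
  · unfold min_moves_to_digit_sum min_moves_to_digit_sum_alt
    rw [if_pos h, if_pos h]
  · unfold min_moves_to_digit_sum_alt
    rw [if_neg h, aport_eq_afold n s h]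
    by_cases hn : 0 < n
    · have hb : n ≤ 2147483648 := by
        unfold Dom_min_moves_to_digit_sum pvDomInt at hdom
        simp only [Bool.and_eq_true, decide_eq_true_eq] at hdom
        exact hdom.1.2
      have hmain := altLoop_eq_afold n s hn hb 0 (by intro k hk1 hk2; omega)
      simp only [gchain, Nat.zero_add, pow_one, pow_zero, Int.ediv_one] at hmain
      exact hmain.symm
    · have hlen : pyDigitLength n = 0 := pyDigitLength_nonpos n hn
      rw [altLoop, dif_neg hn]
      unfold afold
      rw [hlen]
      rfl
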